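-- pv_equiv track=rewrite | github.com/Lolomix351/SD_lab_3 | exercise_2.py | initial_deck_array
-- ===== SOURCE A (Python) =====
-- def initial_deck_array(n):
--     # строим желаемую последовательность на столе: W, B, W, B, …
--     S = ['W' if i % 2 == 0 else 'B' for i in range(n)]
--     D = []
--     # обратный процесс для восстановления исходной колоды
--     for c in reversed(S):
--         if D:
--             # переставляем нижнюю карту наверх
--             D.insert(0, D.pop())
--         # вставляем текущую карту наверх
--         D.insert(0, c)
--     return D
-- ===== SOURCE B (Python) =====
-- def initial_deck_array(n):
--     # Forward simulation of the dealing process: fill a position->card array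
--     # in deal order instead of reverse-simulating the deck.
--     result = [None] * n
--     queue = list(range(n))          # positions of the deck, top first
--     for i in range(n):
--         p = queue.pop(0)            # deal the top card: it is the i-th card on the table
--         result[p] = 'W' if i % 2 == 0 else 'B'
--         if queue:
--             queue.append(queue.pop(0))   # move the new top card under the deck
--     return result
-- ===== Notes on version B (the rewrite author's own statement) =====
-- stated objective: alternative
-- what changed: Replaces A's reverse simulation (repeatedly moving the bottom card on top of a growing deck) with a forward simulation of the dealing process: a queue of original positions is dealt in order, filling a position->card array directly.
import Mathlib
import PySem

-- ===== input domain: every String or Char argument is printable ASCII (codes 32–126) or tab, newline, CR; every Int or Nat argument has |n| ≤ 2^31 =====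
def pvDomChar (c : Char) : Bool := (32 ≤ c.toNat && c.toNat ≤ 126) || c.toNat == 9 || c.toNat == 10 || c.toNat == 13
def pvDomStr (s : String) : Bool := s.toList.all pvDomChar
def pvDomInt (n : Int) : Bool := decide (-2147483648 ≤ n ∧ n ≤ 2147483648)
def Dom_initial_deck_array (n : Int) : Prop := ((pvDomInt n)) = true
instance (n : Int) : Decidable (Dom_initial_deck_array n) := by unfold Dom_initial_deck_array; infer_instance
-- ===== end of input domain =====

-- B replaces A's reverse simulation with a forward simulation of the dealing
-- process over a queue of original positions (alternative decomposition, same cost).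

-- ===== PORT A =====
-- hand port of `D.insert(0, D.pop())`: exact — moves the last element to the front
def pvMoveLastFront (D : List String) : List String :=
  match D.getLast? with
  | none => D
  | some x => x :: D.dropLast

-- one iteration of A's loop body (c is the current card)
def pvAStep (D : List String) (c : String) : List String :=
  let D1 := if D.isEmpty then D else pvMoveLastFront D
  c :: D1

def initial_deck_array (n : Int) : List String :=
  let S := (PySem.List.pyRange 0 n 1).map (fun i => if PySem.Int.mod i 2 == 0 then "W" else "B")
  (S.reverse).foldl pvAStep []

-- ===== PORT B =====
-- the loop of Source B: fuel k = number of remaining iterations, i = loop index,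
-- q = queue of positions, res = result array ("" is the [None]*n placeholder;
-- every cell is overwritten before returning)
def pvBGo : Nat → Nat → List Nat → List String → List String
  | 0, _, _, res => res
  | k+1, i, q, res =>
    match q with
    | [] => res   -- unreachable: the queue holds exactly the k+1 remaining positions
    | p :: q' =>
      let res' := res.set p (if i % 2 == 0 then "W" else "B")
      let q'' := match q' with | [] => ([] : List Nat) | x :: rest => rest ++ [x]
      pvBGo k (i+1) q'' res'

def initial_deck_array_alt (n : Int) : List String :=
  let m := n.toNat
  pvBGo m 0 (List.range m) (List.replicate m "")

-- ===== PRECONDITION & SPEC =====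
def Spec_initial_deck_array (n : Int) (out : List String) : Prop := out = initial_deck_array_alt n
instance (n : Int) (out : List String) : Decidable (Spec_initial_deck_array n out) := by unfold Spec_initial_deck_array; infer_instance

-- ===== CLAIM (what is proved, stated in full; the proofs are below) =====
def Claim_equal_initial_deck_array : Prop := ∀ (n : Int), Dom_initial_deck_array n → Spec_initial_deck_array n (initial_deck_array n)

-- ===== LEMMAS AND PROOFS =====

-- A's loop as a structural recursion on the card list (foldr form of the foldl over the reversed list)
def pvRot (D : List String) : List String := if D.isEmpty then D else pvMoveLastFront D

def pvARec : List String → List String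
  | [] => []
  | c :: cs => c :: pvRot (pvARec cs)

theorem pvFoldl_eq_pvARec (cs : List String) : (cs.reverse).foldl pvAStep [] = pvARec cs := by
  rw [List.foldl_reverse]
  induction cs with
  | nil => rfl
  | cons c cs ih => rw [List.foldr_cons, ih]; rfl

theorem pvRot_length (D : List String) : (pvRot D).length = D.length := by
  cases hL : D.getLast? with
  | none =>
    have : D = [] := by cases D <;> simp_all
    simp [this, pvRot]
  | some x =>
    have hne : D ≠ [] := by intro h; simp [h] at hL
    have hpos : 0 < D.length := List.length_pos_iff.mpr hne
    simp [pvRot, pvMoveLastFront, hL, List.isEmpty_iff, hne, List.length_dropLast]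
    omega

theorem pvARec_length (cs : List String) : (pvARec cs).length = cs.length := by
  induction cs with
  | nil => rfl
  | cons c cs ih => simp [pvARec, pvRot_length, ih]

-- the table sequence W,B,W,B,… starting at deal index i
def pvCards (i k : Nat) : List String :=
  (List.range k).map (fun t => if (i + t) % 2 == 0 then "W" else "B")

theorem pvCards_succ (i k : Nat) :
    pvCards i (k+1) = (if i % 2 == 0 then "W" else "B") :: pvCards (i+1) k := by
  simp [pvCards, List.range_succ_eq_map, List.map_map]
  intro a _
  have h : i + (a + 1) = i + 1 + a := by omega
  rw [h]

theorem pvCards_length (i k : Nat) : (pvCards i k).length = k := by simp [pvCards]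

-- head of the rotation = last element
theorem pvRot_getElem?_zero (D : List String) (h : D ≠ []) :
    (pvRot D)[0]? = D[D.length - 1]? := by
  have h1 : D.isEmpty = false := by simp [h]
  cases hL : D.getLast? with
  | none => exact absurd (by cases D <;> simp_all) h
  | some x =>
    simp [pvRot, h1, pvMoveLastFront, hL]
    rw [← List.getLast?_eq_getElem?, hL]

theorem pvRot_getElem?_succ (D : List String) (u : Nat) (hu : u + 1 < D.length) :
    (pvRot D)[u+1]? = D[u]? := by
  have hne : D ≠ [] := by intro h; simp [h] at hu
  have h1 : D.isEmpty = false := by simp [hne]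
  cases hL : D.getLast? with
  | none => exact absurd (by cases D <;> simp_all) hne
  | some x =>
    simp [pvRot, h1, pvMoveLastFront, hL, List.getElem?_dropLast]
    omega

-- main invariant of B's loop
theorem pvBGo_spec : ∀ (k i : Nat) (q : List Nat) (res : List String),
    q.length = k → q.Nodup → (∀ p ∈ q, p < res.length) →
    (pvBGo k i q res).length = res.length ∧
    (∀ p : Nat, p ∉ q → (pvBGo k i q res)[p]? = res[p]?) ∧
    (∀ j pj : Nat, q[j]? = some pj → (pvBGo k i q res)[pj]? = (pvARec (pvCards i k))[j]?) := by
  intro k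
  induction k with
  | zero =>
    intro i q res hlen _ _
    have hq : q = [] := List.eq_nil_of_length_eq_zero hlen
    subst hq
    exact ⟨rfl, fun _ _ => rfl, fun j pj hj => by simp at hj⟩
  | succ k ih =>
    intro i q res hlen hnd hbd
    cases q with
    | nil => simp at hlen
    | cons p q' =>
      have hplen : p < res.length := hbd p (List.mem_cons_self)
      have hq'len : q'.length = k := by simpa using hlen
      have hpq' : p ∉ q' := (List.nodup_cons.mp hnd).1
      have hnd' : q'.Nodup := (List.nodup_cons.mp hnd).2
      cases q' with
      | nil =>
        have hk : k = 0 := by simpa using hq'len.symm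
        subst hk
        refine ⟨by simp [pvBGo], ?_, ?_⟩
        · intro p' hp'
          have hne : p ≠ p' := by intro h; apply hp'; simp [h]
          simp [pvBGo, List.getElem?_set_ne hne]
        · intro j pj hj
          cases j with
          | zero =>
            have hpj : pj = p := by have := hj; simp at this; omega
            subst hpj
            simp [pvBGo, pvCards, pvARec, pvRot, List.getElem?_set_self hplen]
          | succ t => simp at hj
      | cons x rest =>
        have hstep : pvBGo (k+1) i (p::x::rest) res
            = pvBGo k (i+1) (rest ++ [x]) (res.set p (if i % 2 == 0 then "W" else "B")) := rfl
        have hkpos : k = rest.length + 1 := by simpa using hq'len.symm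
        have hxrest : x ∉ rest := (List.nodup_cons.mp hnd').1
        have hlen'' : (rest ++ [x]).length = k := by simp; omega
        have hnd'' : (rest ++ [x]).Nodup := by
          simp [List.nodup_append, (List.nodup_cons.mp hnd').2]
          intro a ha hax
          exact hxrest (hax ▸ ha)
        have hbd'' : ∀ p'' ∈ rest ++ [x],
            p'' < (res.set p (if i % 2 == 0 then "W" else "B")).length := by
          intro p'' hp''
          have : p'' ∈ p :: x :: rest := by simp at hp'' ⊢; tauto
          simpa using hbd p'' this
        obtain ⟨ihlen, ihoff, ihon⟩ :=
          ih (i+1) (rest ++ [x]) (res.set p (if i % 2 == 0 then "W" else "B")) hlen'' hnd'' hbd''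
        have hA'len : (pvARec (pvCards (i+1) k)).length = k := by
          rw [pvARec_length, pvCards_length]
        have hA'ne : pvARec (pvCards (i+1) k) ≠ [] := by
          intro h; rw [h] at hA'len; simp at hA'len; omega
        have hpoff : p ∉ rest ++ [x] := by
          intro h; apply hpq'; simp at h ⊢; tauto
        refine ⟨?_, ?_, ?_⟩
        · rw [hstep, ihlen]; simp
        · intro p' hp'
          have hne : p ≠ p' := by intro h; apply hp'; simp [h]
          have hp'q : p' ∉ rest ++ [x] := by
            intro h; apply hp'; simp at h ⊢; tauto
          rw [hstep, ihoff p' hp'q, List.getElem?_set_ne hne]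
        · intro j pj hj
          rw [pvCards_succ]
          cases j with
          | zero =>
            have hpj : pj = p := by have := hj; simp at this; omega
            rw [hpj, hstep, ihoff p hpoff, List.getElem?_set_self hplen]
            simp [pvARec]
          | succ t =>
            have hj' : (x :: rest)[t]? = some pj := by simpa using hj
            have hRHS : (pvARec ((if i % 2 == 0 then "W" else "B") :: pvCards (i+1) k))[t+1]?
                = (pvRot (pvARec (pvCards (i+1) k)))[t]? := by simp [pvARec]
            rw [hRHS]
            cases t with
            | zero =>
              have hpj : pj = x := by have := hj'; simp at this; omega
              have hq'' : (rest ++ [x])[rest.length]? = some x := by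
                simp
              rw [hpj, hstep, ihon rest.length x hq'',
                  pvRot_getElem?_zero _ hA'ne, hA'len]
              congr 1
              omega
            | succ u =>
              have hj'' : rest[u]? = some pj := by simpa using hj'
              have hu : u < rest.length := by
                by_contra hc
                rw [List.getElem?_eq_none (by omega)] at hj''
                simp at hj''
              have hq'' : (rest ++ [x])[u]? = some pj := by
                rw [List.getElem?_append_left hu]; exact hj''
              rw [hstep, ihon u pj hq'', pvRot_getElem?_succ _ u (by omega)]

-- ===== VERDICT (by name: the statement is the Claim_ definition above) =====
theorem pvA_eq_pvARec (n : Int) : initial_deck_array n = pvARec (pvCards 0 n.toNat) := by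
  unfold initial_deck_array
  rw [pvFoldl_eq_pvARec]
  congr 1
  rw [PySem.List.pyRange_one, List.map_map]
  unfold pvCards
  have hm : (n - 0).toNat = n.toNat := by omega
  rw [hm]
  apply List.map_congr_left
  intro t ht
  have h2 : ((2:Nat):Int) = 2 := by norm_num
  simp only [Function.comp, zero_add, ← h2, PySem.Int.mod_natCast]
  by_cases hp : t % 2 = 0 <;> simp [hp]
  omega

theorem initial_deck_array_spec : Claim_equal_initial_deck_array := by
  intro n _
  unfold Spec_initial_deck_array initial_deck_array_alt
  obtain ⟨hlen, _, hon⟩ :=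
    pvBGo_spec n.toNat 0 (List.range n.toNat) (List.replicate n.toNat "")
      (by simp) (List.nodup_range) (by intro p hp; simpa using List.mem_range.mp hp)
  rw [pvA_eq_pvARec]
  apply List.ext_getElem?
  intro j
  by_cases hj : j < n.toNat
  · have hq : (List.range n.toNat)[j]? = some j := by
      simp [List.getElem?_range hj]
    exact (hon j j hq).symm
  · rw [List.getElem?_eq_none, List.getElem?_eq_none]
    · rw [hlen]; simp; omega
    · rw [pvARec_length, pvCards_length]; omega
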